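-- pv_equiv track=rewrite | github.com/luckywenfenghe/MATLAB_MCP_ARDUION | main.py | preprocess_matlab_commands
-- ===== SOURCE A (Python) =====
-- def preprocess_matlab_commands(code: str) -> str:
--     """
--     Preprocess MATLAB commands to handle special cases that might cause JSON parsing issues.
--     """
--     # List of special MATLAB commands that need to be handled
--     special_commands = {
--         'clear all': 'clear("all")',
--         'close all': 'close("all")',
--         'clc': 'clc()',
--         'MergeDataF': 'MergeDataF',
--         'MergingDat': 'MergingDat',
--         'PlotingArd': 'PlotingArd',
--         'autoSaveDa': 'autoSaveDa',
--         'auto_input': 'auto_input',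
--         'displayDat': 'displayDat'
--     }
--
--     # Replace special commands
--     processed_code = code
--     for cmd, replacement in special_commands.items():
--         processed_code = processed_code.replace(cmd, replacement)
--
--     return processed_code
-- ===== SOURCE B (Python) =====
-- def _rewrite(code: str, rules: dict) -> str:
--     """One left-to-right pass over code, rewriting the first rule that matches
--     at each position (longer rules first in the table)."""
--     out = []
--     i = 0
--     n = len(code)
--     while i < n:
--         for cmd, replacement in rules.items():
--             if code.startswith(cmd, i):
--                 out.append(replacement)
--                 i += len(cmd)
--                 break
--         else:
--             out.append(code[i])
--             i += 1
--     return ''.join(out)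
--
--
-- def preprocess_matlab_commands(code: str) -> str:
--     """
--     Preprocess MATLAB commands to handle special cases that might cause JSON parsing issues.
--     """
--     # Rewrite the two-word commands first, then parenthesize bare 'clc' in a
--     # second pass so that a 'clc' abutting another command is still caught.
--     code = _rewrite(code, {'clear all': 'clear("all")', 'close all': 'close("all")'})
--     code = _rewrite(code, {'clc': 'clc()'})
--     return code
-- ===== Notes on version B (the rewrite author's own statement) =====
-- stated objective: alternative
-- what changed: Replaced nine sequential whole-string str.replace passes (six of them identity no-ops, which are dropped) by a generic table-driven left-to-right scanner applied in two tiers: one pass rewriting the two two-word commands, then one pass parenthesizing bare 'clc'.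
import Mathlib
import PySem

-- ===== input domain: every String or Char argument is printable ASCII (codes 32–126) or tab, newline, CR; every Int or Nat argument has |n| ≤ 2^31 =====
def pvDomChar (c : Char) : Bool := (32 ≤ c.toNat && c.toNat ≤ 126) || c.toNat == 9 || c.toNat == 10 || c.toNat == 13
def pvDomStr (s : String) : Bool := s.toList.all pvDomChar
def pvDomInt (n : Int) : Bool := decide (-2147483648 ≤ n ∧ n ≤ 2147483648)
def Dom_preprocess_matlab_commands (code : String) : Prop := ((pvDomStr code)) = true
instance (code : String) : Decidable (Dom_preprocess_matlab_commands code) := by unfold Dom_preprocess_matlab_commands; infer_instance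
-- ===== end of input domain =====

-- B replaces A's nine sequential whole-string replace passes (six of them identities) by a
-- table-driven left-to-right scanner applied in two tiers; same return value (alternative, not faster).

-- ===== PORT A =====
def preprocess_matlab_commands (code : String) : String :=
  let p := code
  let p := PySem.Str.replace p "clear all" "clear(\"all\")"
  let p := PySem.Str.replace p "close all" "close(\"all\")"
  let p := PySem.Str.replace p "clc" "clc()"
  let p := PySem.Str.replace p "MergeDataF" "MergeDataF"
  let p := PySem.Str.replace p "MergingDat" "MergingDat"
  let p := PySem.Str.replace p "PlotingArd" "PlotingArd"
  let p := PySem.Str.replace p "autoSaveDa" "autoSaveDa"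
  let p := PySem.Str.replace p "auto_input" "auto_input"
  let p := PySem.Str.replace p "displayDat" "displayDat"
  p

-- ===== PORT B =====
-- Source B's inner `for cmd, replacement in rules.items(): if code.startswith(cmd, i)` loop
def pvFindRule (rules : List (List Char × List Char)) (s : List Char) :
    Option (List Char × Nat) :=
  match rules with
  | [] => none
  | (pat, rep) :: rest =>
      if pat.isPrefixOf s then some (rep, pat.length) else pvFindRule rest s

-- Source B's generic `_rewrite` scanner (`while i < n`); fuel = the remaining length makes
-- the recursion structural (every table below only matches nonempty patterns, so the
-- fuel is never exhausted before the input is)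
def pvScanGen (rules : List (List Char × List Char)) : Nat → List Char → List Char
  | _, [] => []
  | 0, s => s
  | fuel + 1, c :: t =>
      match pvFindRule rules (c :: t) with
      | some (rep, k) => rep ++ pvScanGen rules fuel ((c :: t).drop k)
      | none => c :: pvScanGen rules fuel t

-- the two rule tables of Source B
def pvRules1 : List (List Char × List Char) :=
  [ (['c','l','e','a','r',' ','a','l','l'],
     ['c','l','e','a','r','(','"','a','l','l','"',')']),
    (['c','l','o','s','e',' ','a','l','l'],
     ['c','l','o','s','e','(','"','a','l','l','"',')']) ]
def pvRules2 : List (List Char × List Char) :=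
  [ (['c','l','c'], ['c','l','c','(',')']) ]

def preprocess_matlab_commands_alt (code : String) : String :=
  let s1 := pvScanGen pvRules1 code.toList.length code.toList
  String.ofList (pvScanGen pvRules2 s1.length s1)

-- ===== PRECONDITION & SPEC =====
def Spec_preprocess_matlab_commands (code : String) (out : String) : Prop :=
  out = preprocess_matlab_commands_alt code
instance (code : String) (out : String) : Decidable (Spec_preprocess_matlab_commands code out) := by
  unfold Spec_preprocess_matlab_commands; infer_instance

-- ===== CLAIM (what is proved, stated in full; the proofs are below) =====
def Claim_equal_preprocess_matlab_commands : Prop :=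
  ∀ (code : String), Dom_preprocess_matlab_commands code →
    Spec_preprocess_matlab_commands code (preprocess_matlab_commands code)

-- ===== LEMMAS AND PROOFS =====

-- structural reformulation of Python's str.replace pass (nonempty pattern)
def pvRep (p r : List Char) (s : List Char) : List Char :=
  match s with
  | [] => []
  | c :: t =>
      if p.isPrefixOf (c :: t) then r ++ pvRep p r (t.drop (p.length - 1))
      else c :: pvRep p r t
termination_by s.length
decreasing_by
  · simp [List.length_drop]
  · simp

theorem pvRep_cons_pos (p r : List Char) (c : Char) (t : List Char)
    (h : p.isPrefixOf (c :: t) = true) :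
    pvRep p r (c :: t) = r ++ pvRep p r (t.drop (p.length - 1)) := by
  rw [pvRep]; simp [h]

theorem pvRep_cons_neg (p r : List Char) (c : Char) (t : List Char)
    (h : p.isPrefixOf (c :: t) = false) :
    pvRep p r (c :: t) = c :: pvRep p r t := by
  rw [pvRep]; simp [h]

theorem pvNotPreBool (p s : List Char) (h : ¬ p <+: s) : p.isPrefixOf s = false := by
  cases hb : p.isPrefixOf s
  · rfl
  · exact absurd (List.isPrefixOf_iff_prefix.mp hb) h

theorem pvGo_eq (p r : List Char) (hp : p ≠ []) :
    ∀ (fuel : Nat) (s acc : List Char), s.length ≤ fuel →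
      PySem.Chars.replace.go p r fuel s acc = acc.reverse ++ pvRep p r s := by
  intro fuel
  induction fuel with
  | zero =>
      intro s acc hs
      have : s = [] := by cases s <;> simp_all
      subst this
      simp [PySem.Chars.replace.go, pvRep]
  | succ n IH =>
      intro s acc hs
      cases s with
      | nil => simp [PySem.Chars.replace.go, pvRep]
      | cons c t =>
          rw [PySem.Chars.replace.go]
          by_cases h : p.isPrefixOf (c :: t) = true
          · rw [if_pos h]
            have hdrop : List.drop p.length (c :: t) = t.drop (p.length - 1) := by
              cases p with
              | nil => exact absurd rfl hp
              | cons a q => simp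
            rw [hdrop, IH _ _ (by simp at hs ⊢; omega),
                pvRep_cons_pos p r c t h]
            simp
          · rw [if_neg h, IH _ _ (by simp at hs ⊢; omega),
                pvRep_cons_neg p r c t
                  (pvNotPreBool _ _ (fun hpre => h (List.isPrefixOf_iff_prefix.mpr hpre)))]
            simp

theorem pvReplace_eq (p r s : List Char) (hp : p ≠ []) :
    PySem.Chars.replace s p r = pvRep p r s := by
  unfold PySem.Chars.replace
  rw [if_neg (by simp [hp]), pvGo_eq p r hp s.length s [] (le_refl _)]
  simp

theorem pvRep_self (p : List Char) (hp : p ≠ []) (s : List Char) :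
    pvRep p p s = s := by
  fun_induction pvRep p p s with
  | case1 => rfl
  | case2 c t h IH =>
      rw [IH]
      have hpre : p <+: (c :: t) := List.isPrefixOf_iff_prefix.mp h
      obtain ⟨u, hu⟩ := hpre
      have : t.drop (p.length - 1) = u := by
        have h2 : (c :: t).drop p.length = u := by rw [← hu]; simp
        cases p with
        | nil => exact absurd rfl hp
        | cons a q => simpa using h2
      rw [this, hu]
  | case3 c t h IH => rw [IH]

-- prefixes containing no 'c' pass backwards through a 'c'-headed replace pass
theorem pvRep_prefix_nc (p' r' : List Char) (u : List Char) :
    ∀ w : List Char, 'c' ∉ w → w <+: pvRep ('c' :: p') ('c' :: r') u → w <+: u := by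
  fun_induction pvRep ('c' :: p') ('c' :: r') u with
  | case1 => exact fun w _ h => h
  | case2 c t hpre IH =>
      intro w hw h
      cases w with
      | nil => simp
      | cons a w' =>
          exfalso
          simp only [List.cons_append] at h
          rw [List.cons_prefix_cons] at h
          exact hw (h.1 ▸ List.mem_cons_self)
  | case3 c t hpre IH =>
      intro w hw h
      cases w with
      | nil => simp
      | cons a w' =>
          rw [List.cons_prefix_cons] at h ⊢
          exact ⟨h.1, IH w' (fun hm => hw (List.mem_cons_of_mem _ hm)) h.2⟩

-- abbreviations for the three real passes of A
def pvA1 (s : List Char) : List Char :=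
  pvRep ['c','l','e','a','r',' ','a','l','l'] ['c','l','e','a','r','(','"','a','l','l','"',')'] s
def pvA2 (s : List Char) : List Char :=
  pvRep ['c','l','o','s','e',' ','a','l','l'] ['c','l','o','s','e','(','"','a','l','l','"',')'] s
def pvA3 (s : List Char) : List Char :=
  pvRep ['c','l','c'] ['c','l','c','(',')'] s

-- Source B's first tier equals A's first two replace passes
theorem pvScan1_eq : ∀ (fuel : Nat) (s : List Char), s.length ≤ fuel →
    pvScanGen pvRules1 fuel s = pvA2 (pvA1 s) := by
  intro fuel
  induction fuel with
  | zero =>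
      intro s hs
      have : s = [] := by cases s <;> simp_all
      subst this
      simp [pvScanGen, pvA1, pvA2, pvRep]
  | succ n IH =>
      intro s hs
      by_cases hp1 : ['c','l','e','a','r',' ','a','l','l'] <+: s
      · obtain ⟨u, rfl⟩ := hp1
        have hu : u.length ≤ n := by simp at hs; omega
        simp only [List.cons_append, List.nil_append] at *
        rw [show pvA1 ('c'::'l'::'e'::'a'::'r'::' '::'a'::'l'::'l'::u)
              = 'c'::'l'::'e'::'a'::'r'::'('::'"'::'a'::'l'::'l'::'"'::')'::pvA1 u from by
            simp [pvA1, pvRep, List.isPrefixOf]]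
        rw [show ∀ X, pvA2 ('c'::'l'::'e'::'a'::'r'::'('::'"'::'a'::'l'::'l'::'"'::')'::X)
              = 'c'::'l'::'e'::'a'::'r'::'('::'"'::'a'::'l'::'l'::'"'::')'::pvA2 X from
            fun X => by simp [pvA2, pvRep, List.isPrefixOf]]
        rw [show pvScanGen pvRules1 (n+1) ('c'::'l'::'e'::'a'::'r'::' '::'a'::'l'::'l'::u)
              = 'c'::'l'::'e'::'a'::'r'::'('::'"'::'a'::'l'::'l'::'"'::')'::pvScanGen pvRules1 n u from by
            rw [pvScanGen]; simp [pvFindRule, pvRules1, List.isPrefixOf]]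
        rw [IH u hu]
      · by_cases hp2 : ['c','l','o','s','e',' ','a','l','l'] <+: s
        · obtain ⟨u, rfl⟩ := hp2
          have hu : u.length ≤ n := by simp at hs; omega
          simp only [List.cons_append, List.nil_append] at *
          rw [show pvA1 ('c'::'l'::'o'::'s'::'e'::' '::'a'::'l'::'l'::u)
                = 'c'::'l'::'o'::'s'::'e'::' '::'a'::'l'::'l'::pvA1 u from by
              simp [pvA1, pvRep, List.isPrefixOf]]
          rw [show ∀ X, pvA2 ('c'::'l'::'o'::'s'::'e'::' '::'a'::'l'::'l'::X)
                = 'c'::'l'::'o'::'s'::'e'::'('::'"'::'a'::'l'::'l'::'"'::')'::pvA2 X from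
              fun X => by simp [pvA2, pvRep, List.isPrefixOf]]
          rw [show pvScanGen pvRules1 (n+1) ('c'::'l'::'o'::'s'::'e'::' '::'a'::'l'::'l'::u)
                = 'c'::'l'::'o'::'s'::'e'::'('::'"'::'a'::'l'::'l'::'"'::')'::pvScanGen pvRules1 n u from by
              rw [pvScanGen]
              have b1 := pvNotPreBool _ _ hp1
              simp [pvFindRule, pvRules1, List.isPrefixOf, b1]]
          rw [IH u hu]
        · cases s with
          | nil => simp [pvScanGen, pvA1, pvA2, pvRep]
          | cons c t =>
              have hu : t.length ≤ n := by simp at hs; omega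
              have a1 : pvA1 (c::t) = c :: pvA1 t := by
                unfold pvA1
                exact pvRep_cons_neg _ _ _ _ (pvNotPreBool _ _ hp1)
              have a2 : pvA2 (c :: pvA1 t) = c :: pvA2 (pvA1 t) := by
                unfold pvA2
                apply pvRep_cons_neg
                apply pvNotPreBool
                intro h
                obtain ⟨h1, h2⟩ := List.cons_prefix_cons.mp h
                exact hp2 (List.cons_prefix_cons.mpr
                  ⟨h1, pvRep_prefix_nc _ _ _ _ (by decide) h2⟩)
              have hscan : pvScanGen pvRules1 (n+1) (c :: t) = c :: pvScanGen pvRules1 n t := by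
                rw [pvScanGen]
                have b1 := pvNotPreBool _ _ hp1
                have b2 := pvNotPreBool _ _ hp2
                have f1 : pvFindRule pvRules1 (c :: t) = none := by
                  simp [pvFindRule, pvRules1, b1, b2]
                rw [f1]
              rw [a1, a2, hscan, IH t hu]

-- Source B's second tier equals A's clc replace pass
theorem pvScan2_eq : ∀ (fuel : Nat) (s : List Char), s.length ≤ fuel →
    pvScanGen pvRules2 fuel s = pvA3 s := by
  intro fuel
  induction fuel with
  | zero =>
      intro s hs
      have : s = [] := by cases s <;> simp_all
      subst this
      simp [pvScanGen, pvA3, pvRep]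
  | succ n IH =>
      intro s hs
      by_cases hp : ['c','l','c'] <+: s
      · obtain ⟨u, rfl⟩ := hp
        have hu : u.length ≤ n := by simp at hs; omega
        simp only [List.cons_append, List.nil_append] at *
        rw [show pvA3 ('c'::'l'::'c'::u) = 'c'::'l'::'c'::'('::')'::pvA3 u from by
            unfold pvA3
            rw [pvRep_cons_pos _ _ _ _ (by simp [List.isPrefixOf])]
            simp]
        rw [show pvScanGen pvRules2 (n+1) ('c'::'l'::'c'::u)
              = 'c'::'l'::'c'::'('::')'::pvScanGen pvRules2 n u from by
            rw [pvScanGen]; simp [pvFindRule, pvRules2, List.isPrefixOf]]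
        rw [IH u hu]
      · cases s with
        | nil => simp [pvScanGen, pvA3, pvRep]
        | cons c t =>
            have hu : t.length ≤ n := by simp at hs; omega
            have a3 : pvA3 (c::t) = c :: pvA3 t := by
              unfold pvA3
              exact pvRep_cons_neg _ _ _ _ (pvNotPreBool _ _ hp)
            have hscan : pvScanGen pvRules2 (n+1) (c :: t) = c :: pvScanGen pvRules2 n t := by
              rw [pvScanGen]
              have f1 : pvFindRule pvRules2 (c :: t) = none := by
                simp [pvFindRule, pvRules2, pvNotPreBool _ _ hp]
              rw [f1]
            rw [a3, hscan, IH t hu]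

-- ===== VERDICT (by name: the statement is the Claim_ definition above) =====
theorem preprocess_matlab_commands_spec : Claim_equal_preprocess_matlab_commands := by
  intro code _hdom
  unfold Spec_preprocess_matlab_commands preprocess_matlab_commands preprocess_matlab_commands_alt
  have key : ∀ (s p : String), p.toList ≠ [] → PySem.Str.replace s p p = s := by
    intro s p hp
    have h1 : (PySem.Str.replace s p p).toList = s.toList := by
      rw [PySem.Str.toList_replace, pvReplace_eq _ _ _ hp, pvRep_self _ hp]
    calc PySem.Str.replace s p p
        = String.ofList (PySem.Str.replace s p p).toList := String.ofList_toList.symm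
      _ = String.ofList s.toList := by rw [h1]
      _ = s := String.ofList_toList
  show PySem.Str.replace (PySem.Str.replace (PySem.Str.replace (PySem.Str.replace
      (PySem.Str.replace (PySem.Str.replace (PySem.Str.replace (PySem.Str.replace
      (PySem.Str.replace code "clear all" "clear(\"all\")") "close all" "close(\"all\")")
      "clc" "clc()") "MergeDataF" "MergeDataF") "MergingDat" "MergingDat")
      "PlotingArd" "PlotingArd") "autoSaveDa" "autoSaveDa") "auto_input" "auto_input")
      "displayDat" "displayDat"
      = String.ofList (pvScanGen pvRules2
          (pvScanGen pvRules1 code.toList.length code.toList).length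
          (pvScanGen pvRules1 code.toList.length code.toList))
  rw [key _ "displayDat" (by simp), key _ "auto_input" (by simp),
      key _ "autoSaveDa" (by simp), key _ "PlotingArd" (by simp),
      key _ "MergingDat" (by simp), key _ "MergeDataF" (by simp)]
  have l1 : ("clear all" : String).toList = ['c','l','e','a','r',' ','a','l','l'] := by simp
  have l2 : ("clear(\"all\")" : String).toList
      = ['c','l','e','a','r','(','"','a','l','l','"',')'] := by simp
  have l3 : ("close all" : String).toList = ['c','l','o','s','e',' ','a','l','l'] := by simp
  have l4 : ("close(\"all\")" : String).toList
      = ['c','l','o','s','e','(','"','a','l','l','"',')'] := by simp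
  have l5 : ("clc" : String).toList = ['c','l','c'] := by simp
  have l6 : ("clc()" : String).toList = ['c','l','c','(',')'] := by simp
  have h3 : (PySem.Str.replace (PySem.Str.replace (PySem.Str.replace code
      "clear all" "clear(\"all\")") "close all" "close(\"all\")") "clc" "clc()").toList
      = pvScanGen pvRules2
          (pvScanGen pvRules1 code.toList.length code.toList).length
          (pvScanGen pvRules1 code.toList.length code.toList) := by
    rw [PySem.Str.toList_replace, PySem.Str.toList_replace, PySem.Str.toList_replace,
        pvReplace_eq _ _ _ (by simp), pvReplace_eq _ _ _ (by simp),
        pvReplace_eq _ _ _ (by simp), l1, l2, l3, l4, l5, l6,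
        pvScan1_eq code.toList.length code.toList le_rfl,
        pvScan2_eq _ _ le_rfl]
    rfl
  calc PySem.Str.replace (PySem.Str.replace (PySem.Str.replace code
      "clear all" "clear(\"all\")") "close all" "close(\"all\")") "clc" "clc()"
      = String.ofList (PySem.Str.replace (PySem.Str.replace (PySem.Str.replace code
        "clear all" "clear(\"all\")") "close all" "close(\"all\")") "clc" "clc()").toList :=
        String.ofList_toList.symm
    _ = _ := by rw [h3]
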